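-- pv_equiv track=rewrite | github.com/IIXIIII/CS639_NLP_group17 | analysis/analyze_results.py | section_failure_analysis
-- ===== SOURCE A (Python) =====
-- from collections import defaultdict
--
-- def section_failure_analysis(parsed: list[dict]) -> str:
--     failed = [r for r in parsed if not r["passed"]]
--     round_dist = defaultdict(int)
--     for r in failed:
--         round_dist[r["rounds"]] += 1
--     max_round_fail = [r for r in failed if r["rounds"] >= 8]
--     early_fail = [r for r in failed if r["rounds"] < 3]
--     lines = [
--         "=" * 50,
--         "  FAILURE ANALYSIS",
--         "=" * 50,
--         f"  Total failed: {len(failed)}",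
--         "",
--         "  Failed tasks by round count:",
--     ]
--     for k in sorted(round_dist):
--         lines.append(f"    {k:2d} rounds : {round_dist[k]}")
--     lines += [
--         "",
--         f"  Hit round limit (8 rounds) and failed: {len(max_round_fail)}",
--         f"  Failed in < 3 rounds: {len(early_fail)}",
--         "",
--     ]
--     return "\n".join(lines)
-- ===== SOURCE B (Python) =====
-- def section_failure_analysis(parsed: list[dict]) -> str:
--     # single accumulating pass: no intermediate failed/max/early lists
--     total = 0
--     round_counts = {}
--     max_round = 0
--     early = 0
--     for r in parsed:
--         if not r["passed"]:
--             total += 1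
--             k = r["rounds"]
--             round_counts[k] = round_counts.get(k, 0) + 1
--             if k >= 8:
--                 max_round += 1
--             if k < 3:
--                 early += 1
--     lines = [
--         "=" * 50,
--         "  FAILURE ANALYSIS",
--         "=" * 50,
--         f"  Total failed: {total}",
--         "",
--         "  Failed tasks by round count:",
--     ]
--     for k in sorted(round_counts):
--         lines.append(f"    {k:2d} rounds : {round_counts[k]}")
--     lines.append("")
--     lines.append(f"  Hit round limit (8 rounds) and failed: {max_round}")
--     lines.append(f"  Failed in < 3 rounds: {early}")
--     lines.append("")
--     return "\n".join(lines)
-- ===== Notes on version B (the rewrite author's own statement) =====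
-- stated objective: alternative
-- what changed: A materialises a failed list and re-scans it three times (defaultdict loop plus two filter comprehensions); B makes one accumulating pass over parsed, maintaining a total counter, a plain round_counts dict via .get, and max/early counters, never building the intermediate lists.
import Mathlib
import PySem

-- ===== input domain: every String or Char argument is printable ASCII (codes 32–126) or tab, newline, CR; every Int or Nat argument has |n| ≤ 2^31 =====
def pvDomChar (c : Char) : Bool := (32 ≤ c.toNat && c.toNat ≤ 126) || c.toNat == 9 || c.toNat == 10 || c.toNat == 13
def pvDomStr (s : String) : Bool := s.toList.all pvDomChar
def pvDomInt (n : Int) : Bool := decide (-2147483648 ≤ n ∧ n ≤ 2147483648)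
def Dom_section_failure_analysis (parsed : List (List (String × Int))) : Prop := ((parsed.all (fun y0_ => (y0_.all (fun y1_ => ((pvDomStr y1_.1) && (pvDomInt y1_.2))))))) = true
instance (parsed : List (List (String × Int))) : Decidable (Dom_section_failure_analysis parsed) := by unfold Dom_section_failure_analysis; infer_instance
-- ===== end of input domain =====

-- B replaces A's four scans (failed list + defaultdict loop + two filter comprehensions)
-- with one accumulating pass over parsed; same output, alternative decomposition.


-- ===== PORT A =====
-- Shared input decoding / formatting helpers (both Pythons read the same dict rows
-- and format the same f-strings):
-- a Python dict row, built like dict(pairs): later duplicates overwrite in place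
def pvRow (r : List (String × Int)) : PySem.Dict String Int := PySem.Dict.ofList r

-- r["passed"] is falsy (the lookups use a default; Pre_ guarantees the keys exist)
def pvIsFailed (r : List (String × Int)) : Bool := (pvRow r).getD "passed" 0 == 0

-- r["rounds"]
def pvRounds (r : List (String × Int)) : Int := (pvRow r).getD "rounds" 0

-- f"{k:2d}": str(k) right-justified to width 2 with spaces
def pvFmt2 (k : Int) : String :=
  let s := PySem.Int.toChars k
  String.ofList (List.replicate (2 - s.length) ' ' ++ s)

-- "=" * 50
def pvEq50 : String := String.ofList (List.replicate 50 '=')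

def section_failure_analysis (parsed : List (List (String × Int))) : String :=
  let failed := parsed.filter (fun r => pvIsFailed r)
  -- defaultdict(int): round_dist[r["rounds"]] += 1
  let round_dist := failed.foldl (fun d r => d.modify (pvRounds r) 0 (· + 1))
                      (PySem.Dict.empty : PySem.Dict Int Int)
  let max_round_fail := failed.filter (fun r => decide (pvRounds r ≥ 8))
  let early_fail := failed.filter (fun r => decide (pvRounds r < 3))
  let lines : List String :=
    [pvEq50, "  FAILURE ANALYSIS", pvEq50,
     "  Total failed: " ++ PySem.Int.toStr (failed.length : Int), "",
     "  Failed tasks by round count:"]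
    ++ (PySem.List.sorted round_dist.keys (fun k => k) false).map
         (fun k => "    " ++ pvFmt2 k ++ " rounds : " ++ PySem.Int.toStr (round_dist.getD k 0))
    ++ ["",
        "  Hit round limit (8 rounds) and failed: " ++ PySem.Int.toStr (max_round_fail.length : Int),
        "  Failed in < 3 rounds: " ++ PySem.Int.toStr (early_fail.length : Int),
        ""]
  PySem.Str.join "\n" lines

-- ===== PORT B =====
-- one step of B's single accumulating pass: (total, round_counts, max_round, early)
def pvBStep (st : Int × PySem.Dict Int Int × Int × Int) (r : List (String × Int)) :
    Int × PySem.Dict Int Int × Int × Int :=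
  if pvIsFailed r then
    let k := pvRounds r
    (st.1 + 1,
     st.2.1.insert k (st.2.1.getD k 0 + 1),   -- round_counts[k] = round_counts.get(k, 0) + 1
     st.2.2.1 + (if k ≥ 8 then 1 else 0),
     st.2.2.2 + (if k < 3 then 1 else 0))
  else st

def section_failure_analysis_alt (parsed : List (List (String × Int))) : String :=
  let st := parsed.foldl pvBStep (0, PySem.Dict.empty, 0, 0)
  let total := st.1
  let round_counts := st.2.1
  let max_round := st.2.2.1
  let early := st.2.2.2
  let lines : List String :=
    [pvEq50, "  FAILURE ANALYSIS", pvEq50,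
     "  Total failed: " ++ PySem.Int.toStr total, "",
     "  Failed tasks by round count:"]
    ++ (PySem.List.sorted round_counts.keys (fun k => k) false).map
         (fun k => "    " ++ pvFmt2 k ++ " rounds : " ++ PySem.Int.toStr (round_counts.getD k 0))
    ++ ["",
        "  Hit round limit (8 rounds) and failed: " ++ PySem.Int.toStr max_round,
        "  Failed in < 3 rounds: " ++ PySem.Int.toStr early,
        ""]
  PySem.Str.join "\n" lines

-- ===== PRECONDITION & SPEC =====
-- Pre_ excludes exactly the rows that make Python raise KeyError: a row without the
-- key "passed", or a failed row (passed falsy) without the key "rounds".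
def Pre_section_failure_analysis (parsed : List (List (String × Int))) : Prop :=
  ∀ r ∈ parsed, (pvRow r).contains "passed" = true ∧
    ((pvRow r).getD "passed" 1 = 0 → (pvRow r).contains "rounds" = true)
instance (parsed : List (List (String × Int))) : Decidable (Pre_section_failure_analysis parsed) := by unfold Pre_section_failure_analysis; infer_instance

def pvWitness_section_failure_analysis : (List (List (String × Int))) :=
  [[("passed", 1)], [("passed", 0), ("rounds", 2)], [("passed", 0), ("rounds", 9)]]

def Spec_section_failure_analysis (parsed : List (List (String × Int))) (out : String) : Prop := out = section_failure_analysis_alt parsed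
instance (parsed : List (List (String × Int))) (out : String) : Decidable (Spec_section_failure_analysis parsed out) := by unfold Spec_section_failure_analysis; infer_instance

-- ===== CLAIM (what is proved, stated in full; the proofs are below) =====
def Claim_equal_section_failure_analysis : Prop := ∀ (parsed : List (List (String × Int))), Dom_section_failure_analysis parsed → Pre_section_failure_analysis parsed → Spec_section_failure_analysis parsed (section_failure_analysis parsed)

-- ===== LEMMAS AND PROOFS =====

-- B's fold, decomposed into A's four quantities (any starting accumulator)
theorem pvBFold_eq (l : List (List (String × Int))) :
    ∀ (t m e : Int) (d : PySem.Dict Int Int),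
    l.foldl pvBStep (t, d, m, e) =
      (t + ((l.filter (fun r => pvIsFailed r)).length : Int),
       (l.filter (fun r => pvIsFailed r)).foldl
         (fun d r => d.insert (pvRounds r) (d.getD (pvRounds r) 0 + 1)) d,
       m + (((l.filter (fun r => pvIsFailed r)).filter (fun r => decide (pvRounds r ≥ 8))).length : Int),
       e + (((l.filter (fun r => pvIsFailed r)).filter (fun r => decide (pvRounds r < 3))).length : Int)) := by
  induction l with
  | nil => intro t m e d; simp
  | cons r l ih =>
    intro t m e d
    by_cases h : pvIsFailed r
    · simp only [List.foldl_cons, List.filter_cons, h, if_pos, pvBStep, ih]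
      by_cases h8 : pvRounds r ≥ 8 <;> by_cases h3 : pvRounds r < 3 <;>
        simp [h8, h3, Prod.ext_iff] <;> omega
    · simp [List.foldl_cons, h, pvBStep, ih]

-- A's defaultdict loop and B's .get/insert loop build the same dict: both are Counter(rounds of failed)
theorem pvDicts_eq (failed : List (List (String × Int))) :
    failed.foldl (fun d r => d.modify (pvRounds r) 0 (· + 1)) (PySem.Dict.empty : PySem.Dict Int Int)
      = failed.foldl (fun d r => d.insert (pvRounds r) (d.getD (pvRounds r) 0 + 1)) PySem.Dict.empty := by
  have h1 : failed.foldl (fun d r => d.modify (pvRounds r) 0 (· + 1)) (PySem.Dict.empty : PySem.Dict Int Int)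
      = PySem.Dict.counter (failed.map pvRounds) := by
    rw [PySem.Dict.counter_eq_foldl, List.foldl_map]
  have h2 : failed.foldl (fun d r => d.insert (pvRounds r) (d.getD (pvRounds r) 0 + 1)) (PySem.Dict.empty : PySem.Dict Int Int)
      = PySem.Dict.counter (failed.map pvRounds) := by
    rw [← PySem.Dict.foldl_insert_getD_add_one_eq_counter, List.foldl_map]
  rw [h1, h2]

-- ===== VERDICT (by name: the statement is the Claim_ definition above) =====
theorem section_failure_analysis_spec : Claim_equal_section_failure_analysis := by
  intro parsed _ _
  unfold Spec_section_failure_analysis section_failure_analysis section_failure_analysis_alt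
  dsimp only
  rw [pvBFold_eq, pvDicts_eq]
  simp
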